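-- pv_equiv track=rewrite | github.com/kimsuel/algorithm | 2021/line_test_02.py | solution
-- ===== SOURCE A (Python) =====
-- def solution(arr):
--     answer = 0
--     result = []
--     for i in range(len(arr)-1):
--         if arr[i] < arr[i+1]:
--             result.append('up')
--         elif arr[i] == arr[i+1]:
--             result.append('same')
--         else:
--             result.append('down')
--
--     answer = compare(result)
--
--     return answer
--
-- def compare(result):
--     count = 0
--     k = 0
--     for i in range(len(result)-1):
--         up_count = 0
--         down_count = 0
--         if result[i] == 'up' and result[i+1] == 'down':
--             count += 1
--             for j in range(i, k, -1):
--                 if result[j-1] == 'up':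
--                     count += 1
--                     up_count += 1
--                 else:
--                     break
--             for j in range(i+1, len(result)-1):
--                 if result[j+1] == 'down':
--                     count += 1
--                     down_count += 1
--                 else:
--                     break
--             k = i
--             if up_count > 0 and down_count > 0:
--                 count += min(up_count, down_count)
--     return count % (10**9 + 7)
-- ===== SOURCE B (Python) =====
-- def solution(arr):
--     n = len(arr)
--     dirs = []
--     for i in range(n - 1):
--         a, b = arr[i], arr[i + 1]
--         dirs.append('up' if a < b else 'same' if a == b else 'down')
--     m = len(dirs)
--     up_end = [0] * m
--     for i in range(m):
--         if dirs[i] == 'up':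
--             up_end[i] = (up_end[i - 1] if i > 0 else 0) + 1
--     down_start = [0] * m
--     for i in range(m - 1, -1, -1):
--         if dirs[i] == 'down':
--             down_start[i] = (down_start[i + 1] if i + 1 < m else 0) + 1
--     total = 0
--     for i in range(m - 1):
--         if dirs[i] == 'up' and dirs[i + 1] == 'down':
--             u = up_end[i] - 1
--             d = down_start[i + 1] - 1
--             total += 1 + u + d
--             if u > 0 and d > 0:
--                 total += min(u, d)
--     return total % (10 ** 9 + 7)
-- ===== Notes on version B (the rewrite author's own statement) =====
-- stated objective: alternative
-- what changed: Replaces A's per-peak nested backward/forward rescans (with the previous-peak bound k) by two precomputed linear run-length arrays (maximal 'up'-run ending at i, maximal 'down'-run starting at i) and a single summing pass over peaks.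
import Mathlib
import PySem

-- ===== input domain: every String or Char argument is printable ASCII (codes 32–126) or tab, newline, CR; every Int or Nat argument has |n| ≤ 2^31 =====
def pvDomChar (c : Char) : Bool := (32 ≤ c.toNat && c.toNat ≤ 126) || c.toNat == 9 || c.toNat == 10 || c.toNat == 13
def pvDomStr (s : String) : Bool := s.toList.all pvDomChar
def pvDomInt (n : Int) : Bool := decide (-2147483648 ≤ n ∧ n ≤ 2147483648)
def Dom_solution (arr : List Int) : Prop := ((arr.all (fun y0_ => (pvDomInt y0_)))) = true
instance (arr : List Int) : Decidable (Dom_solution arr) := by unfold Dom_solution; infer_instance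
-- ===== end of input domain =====

-- B replaces A's per-peak backward/forward rescans by two precomputed run-length arrays and one summing pass (alternative algorithm).
-- Both Pythons build the same pairwise direction list; `pvDirs` is that shared pairwise pass.

-- ===== PORT A =====
-- the direction-building loop over adjacent pairs (identical in A and B)
def pvDirs : List Int → List String
  | a :: b :: rest =>
      (if a < b then "up" else if a = b then "same" else "down") :: pvDirs (b :: rest)
  | _ => []

-- A's backward inner loop: for j in range(i, k, -1): if result[j-1]=='up' count else break
def pvBack (r : List String) (j k : Nat) : Nat :=
  if j > k then
    (if r.getD (j - 1) "" = "up" then pvBack r (j - 1) k + 1 else 0)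
  else 0
termination_by j
decreasing_by omega

-- A's forward inner loop: for j in range(i+1, len(result)-1): if result[j+1]=='down' count else break
def pvFwd (r : List String) (j : Nat) : Nat :=
  if j < r.length - 1 then
    (if r.getD (j + 1) "" = "down" then pvFwd r (j + 1) + 1 else 0)
  else 0
termination_by r.length - j
decreasing_by omega

-- A's main loop of `compare`, state (count, k)
def pvALoop (r : List String) (i count k : Nat) : Nat :=
  if i + 1 < r.length then
    (if r.getD i "" = "up" ∧ r.getD (i + 1) "" = "down" then
      let u := pvBack r i k
      let d := pvFwd r (i + 1)
      pvALoop r (i + 1) (count + 1 + u + d + (if 0 < u ∧ 0 < d then min u d else 0)) i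
    else pvALoop r (i + 1) count k)
  else count
termination_by r.length - i
decreasing_by all_goals omega

def solution (arr : List Int) : Int :=
  (pvALoop (pvDirs arr) 0 0 0 : Int) % (10 ^ 9 + 7)

-- ===== PORT B =====
-- up_end array: forward pass carrying the previous entry
def pvUpGo (prev : Nat) : List String → List Nat
  | [] => []
  | d :: ds => let v := if d = "up" then prev + 1 else 0
               v :: pvUpGo v ds

def pvUpEnds (r : List String) : List Nat := pvUpGo 0 r

-- down_start array: backward pass reading the next entry
def pvDownStarts : List String → List Nat
  | [] => []
  | d :: ds =>
      let rest := pvDownStarts ds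
      (if d = "down" then rest.headD 0 + 1 else 0) :: rest

-- B's single summing pass over peak positions
def pvBLoop (r : List String) (ue ds : List Nat) (i total : Nat) : Nat :=
  if i + 1 < r.length then
    (if r.getD i "" = "up" ∧ r.getD (i + 1) "" = "down" then
      let u := ue.getD i 0 - 1
      let d := ds.getD (i + 1) 0 - 1
      pvBLoop r ue ds (i + 1) (total + 1 + u + d + (if 0 < u ∧ 0 < d then min u d else 0))
    else pvBLoop r ue ds (i + 1) total)
  else total
termination_by r.length - i
decreasing_by all_goals omega

def solution_alt (arr : List Int) : Int :=
  (pvBLoop (pvDirs arr) (pvUpEnds (pvDirs arr)) (pvDownStarts (pvDirs arr)) 0 0 : Int) % (10 ^ 9 + 7)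

-- ===== PRECONDITION & SPEC =====
def Spec_solution (arr : List Int) (out : Int) : Prop := out = solution_alt arr
instance (arr : List Int) (out : Int) : Decidable (Spec_solution arr out) := by unfold Spec_solution; infer_instance

-- ===== CLAIM (what is proved, stated in full; the proofs are below) =====
def Claim_equal_solution : Prop := ∀ (arr : List Int), Dom_solution arr → Spec_solution arr (solution arr)

-- ===== LEMMAS AND PROOFS =====

lemma pvDownStarts_length (r : List String) : (pvDownStarts r).length = r.length := by
  induction r with
  | nil => simp [pvDownStarts]
  | cons d ds ih => simp [pvDownStarts, ih]

-- up_end recurrence at index 0 (seed 0)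
lemma ue_zero (r : List String) :
    (pvUpEnds r).getD 0 0 = if r.getD 0 "" = "up" then 1 else 0 := by
  cases r with
  | nil => simp [pvUpEnds, pvUpGo]
  | cons d ds => simp [pvUpEnds, pvUpGo]

-- up_end recurrence at a successor index
lemma ue_succ_gen (r : List String) (p i : Nat) (h : i + 1 < r.length) :
    (pvUpGo p r).getD (i + 1) 0 =
      if r.getD (i + 1) "" = "up" then (pvUpGo p r).getD i 0 + 1 else 0 := by
  induction r generalizing p i with
  | nil => simp at h
  | cons d ds ih =>
      cases i with
      | zero =>
          cases ds with
          | nil => simp at h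
          | cons e es => simp [pvUpGo]
      | succ j =>
          have h' : j + 1 < ds.length := by simpa using h
          simpa [pvUpGo] using ih _ j h'

lemma ue_succ (r : List String) (i : Nat) (h : i + 1 < r.length) :
    (pvUpEnds r).getD (i + 1) 0 =
      if r.getD (i + 1) "" = "up" then (pvUpEnds r).getD i 0 + 1 else 0 :=
  ue_succ_gen r 0 i h

-- down_start recurrence
lemma ds_rec (r : List String) (i : Nat) (h : i < r.length) :
    (pvDownStarts r).getD i 0 =
      if r.getD i "" = "down" then (pvDownStarts r).getD (i + 1) 0 + 1 else 0 := by
  induction r generalizing i with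
  | nil => simp at h
  | cons d ds ih =>
      cases i with
      | zero =>
          cases ds with
          | nil => simp [pvDownStarts]
          | cons e es => simp [pvDownStarts, List.headD]
      | succ j =>
          have h' : j < ds.length := by simpa using h
          simpa [pvDownStarts] using ih j h'

lemma ds_out (r : List String) (i : Nat) (h : r.length ≤ i) :
    (pvDownStarts r).getD i 0 = 0 := by
  apply List.getD_eq_default
  simpa [pvDownStarts_length] using h

-- A's forward scan equals the down_start array shifted by one
lemma fwd_eq (r : List String) (j : Nat) :
    pvFwd r j = (pvDownStarts r).getD (j + 1) 0 := by
  by_cases h : j < r.length - 1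
  · rw [pvFwd, if_pos h]
    have h1 : j + 1 < r.length := by omega
    rw [ds_rec r (j + 1) h1]
    by_cases hd : r.getD (j + 1) "" = "down"
    · rw [if_pos hd, if_pos hd, fwd_eq r (j + 1)]
    · rw [if_neg hd, if_neg hd]
  · rw [pvFwd, if_neg h]
    rw [ds_out r (j + 1) (by omega)]
termination_by r.length - j
decreasing_by omega

-- the unbounded backward scan is at most its starting index
lemma back_le (r : List String) (i : Nat) : pvBack r i 0 ≤ i := by
  induction i with
  | zero => rw [pvBack]; simp
  | succ m ih =>
      rw [pvBack, if_pos (by omega)]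
      simp only [Nat.add_sub_cancel]
      split
      · omega
      · omega

-- a non-'up' position caps the unbounded backward scan
lemma back_cap (r : List String) (i m : Nat) (hm : m < i) (h : r.getD m "" ≠ "up") :
    pvBack r i 0 ≤ i - m - 1 := by
  induction i with
  | zero => omega
  | succ t ih =>
      rw [pvBack, if_pos (by omega)]
      simp only [Nat.add_sub_cancel]
      by_cases hu : r.getD t "" = "up"
      · rw [if_pos hu]
        have hmt : m < t := by
          rcases Nat.lt_succ_iff_lt_or_eq.mp hm with h1 | h1
          · exact h1
          · exact absurd (h1 ▸ hu) h
        have := ih hmt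
        omega
      · rw [if_neg hu]; omega

-- the bounded backward scan is the unbounded one truncated at i - k
lemma back_min (r : List String) (i k : Nat) :
    pvBack r i k = min (pvBack r i 0) (i - k) := by
  induction i generalizing k with
  | zero => rw [pvBack, pvBack]; simp
  | succ m ih =>
      by_cases hk : k < m + 1
      · rw [pvBack, if_pos hk]
        conv_rhs => rw [pvBack, if_pos (by omega)]
        simp only [Nat.add_sub_cancel]
        by_cases hu : r.getD m "" = "up"
        · rw [if_pos hu, if_pos hu, ih k, ih 0]
          have := back_le r m
          omega
        · rw [if_neg hu, if_neg hu]; simp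
      · rw [pvBack, if_neg (by omega)]
        omega

-- unbounded backward scan vs up_end at an 'up' position
lemma back_eq_ue (r : List String) (i : Nat) (hi : i < r.length) (hu : r.getD i "" = "up") :
    pvBack r i 0 + 1 = (pvUpEnds r).getD i 0 := by
  induction i with
  | zero =>
      rw [ue_zero, if_pos hu, pvBack]; simp
  | succ m ih =>
      rw [ue_succ r m hi, if_pos hu]
      rw [pvBack, if_pos (by omega)]
      simp only [Nat.add_sub_cancel]
      by_cases hm : r.getD m "" = "up"
      · rw [if_pos hm, ← ih (by omega) hm]
      · rw [if_neg hm]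
        -- up_end at a non-'up' position is 0
        have hz : (pvUpEnds r).getD m 0 = 0 := by
          cases m with
          | zero => rw [ue_zero, if_neg hm]
          | succ t => rw [ue_succ r t (by omega), if_neg hm]
        omega

-- invariant on A's k: initial, or the previous peak's following 'down' position
def pvInv (r : List String) (k i : Nat) : Prop :=
  k = 0 ∨ (r.getD (k + 1) "" = "down" ∧ k < i)

-- main loop equivalence under the invariant
lemma loop_eq (r : List String) (n i c k : Nat) (hn : r.length - i ≤ n)
    (hk : pvInv r k i) :
    pvALoop r i c k = pvBLoop r (pvUpEnds r) (pvDownStarts r) i c := by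
  induction n generalizing i c k with
  | zero =>
      rw [pvALoop, pvBLoop, if_neg (by omega), if_neg (by omega)]
  | succ n ih =>
      by_cases h : i + 1 < r.length
      · rw [pvALoop, if_pos h, pvBLoop, if_pos h]
        by_cases hp : r.getD i "" = "up" ∧ r.getD (i + 1) "" = "down"
        · rw [if_pos hp, if_pos hp]
          -- backward scan = up_end[i] - 1
          have hue : pvBack r i k = (pvUpEnds r).getD i 0 - 1 := by
            have h1 := back_eq_ue r i (by omega) hp.1
            have h2 := back_min r i k
            rcases hk with hk0 | ⟨hkd, hki⟩
            · subst hk0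
              have := back_le r i
              omega
            · have hne : k + 1 ≠ i := by
                intro he; rw [he] at hkd
                rw [hkd] at hp
                exact absurd hp.1 (by decide)
              have hcap : pvBack r i 0 ≤ i - (k + 1) - 1 :=
                back_cap r i (k + 1) (by omega) (by rw [hkd]; decide)
              omega
          -- forward scan = down_start[i+1] - 1
          have hds : pvFwd r (i + 1) = (pvDownStarts r).getD (i + 1) 0 - 1 := by
            rw [fwd_eq r (i + 1)]
            rw [ds_rec r (i + 1) h, if_pos hp.2]
            omega
          rw [hue, hds]
          exact ih (i + 1) _ i (by omega) (Or.inr ⟨hp.2, by omega⟩)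
        · rw [if_neg hp, if_neg hp]
          apply ih (i + 1) c k (by omega)
          rcases hk with hk0 | ⟨hkd, hki⟩
          · exact Or.inl hk0
          · exact Or.inr ⟨hkd, by omega⟩
      · rw [pvALoop, if_neg h, pvBLoop, if_neg h]

-- ===== VERDICT (by name: the statement is the Claim_ definition above) =====
theorem solution_spec : Claim_equal_solution := by
  intro arr _
  show solution arr = solution_alt arr
  unfold solution solution_alt
  rw [loop_eq (pvDirs arr) (pvDirs arr).length 0 0 0 (by omega) (Or.inl rfl)]
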